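-- pv_equiv track=rewrite | github.com/CanaryWharf/Wood-Division | backend.py | lane_match
-- ===== SOURCE A (Python) =====
-- def lane_match(friends, bullies, lane):
--     f1 = []
--     b1 = []
--     for key in bullies:
--         if bullies[key] == lane:
--             x = None
--             for y in friends:
--                 if friends[y] == lane:
--                     x = y
--                     friends.pop(x)
--                     break
--             f1.append(x)
--             b1.append(key)
--     return f1, b1
-- ===== SOURCE B (Python) =====
-- # B: precompute the in-lane friend keys once and pair them with the in-lane
-- # bullies by position, instead of A's nested search-and-pop over friends.
-- # Like A, it removes the matched friends from the `friends` dict (side effect kept).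
-- def lane_match(friends, bullies, lane):
--     b1 = [k for k, v in bullies.items() if v == lane]
--     it = iter([k for k, v in friends.items() if v == lane])
--     f1 = [next(it, None) for _ in b1]
--     for k in f1:
--         if k is not None:
--             friends.pop(k)
--     return f1, b1
-- ===== Notes on version B (the rewrite author's own statement) =====
-- stated objective: alternative
-- what changed: A rescans the friends dict for every in-lane bully with a nested search-and-pop loop; B builds the list of in-lane friend keys once and pairs it with the in-lane bullies by position via an iterator (worst-case O(B+F) vs A's worst-case O(B*F), though A's early break makes random inputs comparable).
import Mathlib
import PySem

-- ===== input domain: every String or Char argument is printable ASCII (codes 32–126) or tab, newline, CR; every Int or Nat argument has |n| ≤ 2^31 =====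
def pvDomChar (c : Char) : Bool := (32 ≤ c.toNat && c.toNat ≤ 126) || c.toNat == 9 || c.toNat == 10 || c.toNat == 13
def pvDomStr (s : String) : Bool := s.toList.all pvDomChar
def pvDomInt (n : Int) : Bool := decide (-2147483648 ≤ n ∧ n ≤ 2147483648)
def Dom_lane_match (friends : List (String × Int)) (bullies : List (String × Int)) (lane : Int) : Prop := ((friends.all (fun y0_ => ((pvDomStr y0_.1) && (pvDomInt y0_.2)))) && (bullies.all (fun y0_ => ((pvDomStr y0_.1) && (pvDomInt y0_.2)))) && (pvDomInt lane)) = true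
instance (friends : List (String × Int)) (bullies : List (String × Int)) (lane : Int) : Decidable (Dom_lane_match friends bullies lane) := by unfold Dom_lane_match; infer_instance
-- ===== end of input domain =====

-- NOTE: Python A mutates its `friends` dict (pops each matched friend); B performs the
-- same mutation. The theorems here are about the RETURN value only.

-- ===== PORT A =====
-- inner loop: `for y in friends: if friends[y] == lane: x = y; friends.pop(x); break`
-- (with unique keys, friends[y] is the value paired with y in the scan)
def lmFind : List (String × Int) → Int → Option String
  | [], _ => none
  | (y, v) :: rest, lane => if v = lane then some y else lmFind rest lane

-- `friends.pop(x)`: remove the entry with key x (first occurrence)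
def lmErase : List (String × Int) → String → List (String × Int)
  | [], _ => []
  | p :: rest, k => if p.1 = k then rest else p :: lmErase rest k

-- outer loop over the bullies dict, threading the mutable friends dict and both accumulators
def lmOuter (lane : Int) : List (String × Int) → List (String × Int) → List (Option String) → List String → List (Option String) × List String
  | [], _, f1, b1 => (f1, b1)
  | (key, v) :: rest, fr, f1, b1 =>
    if v = lane then
      match lmFind fr lane with
      | some y => lmOuter lane rest (lmErase fr y) (f1 ++ [some y]) (b1 ++ [key])
      | none   => lmOuter lane rest fr (f1 ++ [none]) (b1 ++ [key])
    else lmOuter lane rest fr f1 b1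

def lane_match (friends : List (String × Int)) (bullies : List (String × Int)) (lane : Int) : List (Option String) × List String :=
  lmOuter lane bullies friends [] []

-- ===== PORT B =====
-- `[next(it, None) for _ in b1]`: consume fs by position, padding with none
def lmPad : List String → List String → List (Option String)
  | [], _ => []
  | _ :: bs, [] => none :: lmPad bs []
  | _ :: bs, f :: fs => some f :: lmPad bs fs

def lane_match_alt (friends : List (String × Int)) (bullies : List (String × Int)) (lane : Int) : List (Option String) × List String :=
  let b1 := (bullies.filter (fun p => p.2 = lane)).map Prod.fst
  let fs := (friends.filter (fun p => p.2 = lane)).map Prod.fst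
  (lmPad b1 fs, b1)

-- ===== PRECONDITION & SPEC =====
-- Pre_ excludes association lists with duplicate keys: a Python dict (the type A is called
-- with) cannot hold duplicate keys, so such lists correspond to no Python input at all.
def Pre_lane_match (friends : List (String × Int)) (bullies : List (String × Int)) (lane : Int) : Prop :=
  (friends.map Prod.fst).Nodup ∧ (bullies.map Prod.fst).Nodup
instance (friends : List (String × Int)) (bullies : List (String × Int)) (lane : Int) : Decidable (Pre_lane_match friends bullies lane) := by unfold Pre_lane_match; infer_instance

def pvWitness_lane_match : (List (String × Int)) × (List (String × Int)) × Int :=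
  ([("amy", 1), ("bob", 2)], [("cat", 1), ("dan", 1)], 1)

def Spec_lane_match (friends : List (String × Int)) (bullies : List (String × Int)) (lane : Int) (out : List (Option String) × List String) : Prop := out = lane_match_alt friends bullies lane
instance (friends : List (String × Int)) (bullies : List (String × Int)) (lane : Int) (out : List (Option String) × List String) : Decidable (Spec_lane_match friends bullies lane out) := by unfold Spec_lane_match; infer_instance

-- ===== CLAIM (what is proved, stated in full; the proofs are below) =====
def Claim_equal_lane_match : Prop := ∀ (friends : List (String × Int)) (bullies : List (String × Int)) (lane : Int), Dom_lane_match friends bullies lane → Pre_lane_match friends bullies lane → Spec_lane_match friends bullies lane (lane_match friends bullies lane)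

-- ===== LEMMAS AND PROOFS =====

-- a found friend is a key of the list
theorem lmFind_mem {fr : List (String × Int)} {lane : Int} {y : String}
    (h : lmFind fr lane = some y) : y ∈ fr.map Prod.fst := by
  induction fr with
  | nil => simp [lmFind] at h
  | cons p rest ih =>
    obtain ⟨a, v⟩ := p
    by_cases hv : v = lane
    · simp [lmFind, hv] at h
      simp [h]
    · simp only [lmFind, if_neg hv] at h
      simp only [List.map_cons]
      exact List.mem_cons_of_mem _ (ih h)

-- no friend found ⟺ no in-lane friend
theorem lmFind_none {fr : List (String × Int)} {lane : Int}
    (h : lmFind fr lane = none) : fr.filter (fun p => p.2 = lane) = [] := by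
  induction fr with
  | nil => rfl
  | cons p rest ih =>
    obtain ⟨a, v⟩ := p
    by_cases hv : v = lane
    · simp [lmFind, hv] at h
    · simp only [lmFind, if_neg hv] at h
      simpa [List.filter_cons, hv] using ih h

-- lmErase only removes an entry: keys form a sublist
theorem lmErase_keys_sublist (fr : List (String × Int)) (k : String) :
    ((lmErase fr k).map Prod.fst).Sublist (fr.map Prod.fst) := by
  induction fr with
  | nil => simp [lmErase]
  | cons p rest ih =>
    by_cases hk : p.1 = k
    · simp only [lmErase, if_pos hk, List.map_cons]
      exact (List.sublist_cons_self _ _)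
    · simpa [lmErase, hk] using ih.cons₂ p.1

-- erasing the found friend removes exactly the head of the in-lane key list
theorem lmFind_erase {fr : List (String × Int)} {lane : Int} {y : String}
    (hnd : (fr.map Prod.fst).Nodup) (h : lmFind fr lane = some y) :
    (fr.filter (fun p => p.2 = lane)).map Prod.fst
      = y :: ((lmErase fr y).filter (fun p => p.2 = lane)).map Prod.fst := by
  induction fr with
  | nil => simp [lmFind] at h
  | cons p rest ih =>
    obtain ⟨a, v⟩ := p
    simp only [List.map_cons, List.nodup_cons] at hnd
    by_cases hv : v = lane
    · simp [lmFind, hv] at h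
      subst h
      simp [lmErase, hv]
    · simp only [lmFind, if_neg hv] at h
      have hy : y ∈ rest.map Prod.fst := lmFind_mem h
      have hay : a ≠ y := fun e => hnd.1 (e ▸ hy)
      simp only [lmErase, if_neg hay, List.filter_cons, decide_eq_true_eq, hv]
      exact ih hnd.2 h

-- main invariant for A's outer loop
theorem lmOuter_eq (lane : Int) (bs fr : List (String × Int))
    (f1 : List (Option String)) (b1 : List String)
    (hnd : (fr.map Prod.fst).Nodup) :
    lmOuter lane bs fr f1 b1
      = (f1 ++ lmPad ((bs.filter (fun p => p.2 = lane)).map Prod.fst)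
                     ((fr.filter (fun p => p.2 = lane)).map Prod.fst),
         b1 ++ (bs.filter (fun p => p.2 = lane)).map Prod.fst) := by
  induction bs generalizing fr f1 b1 with
  | nil => simp [lmOuter, lmPad]
  | cons p rest ih =>
    obtain ⟨key, v⟩ := p
    simp only [lmOuter]
    by_cases hv : v = lane
    · rw [if_pos hv]
      cases hfind : lmFind fr lane with
      | some y =>
        have hnd' : ((lmErase fr y).map Prod.fst).Nodup :=
          hnd.sublist (lmErase_keys_sublist fr y)
        dsimp only
        rw [ih (lmErase fr y) _ _ hnd']
        simp [hv, lmFind_erase hnd hfind, lmPad]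
      | none =>
        rw [ih fr _ _ hnd]
        simp [hv, lmFind_none hfind, lmPad]
    · rw [if_neg hv]
      rw [ih fr _ _ hnd]
      simp [hv]

-- ===== VERDICT (by name: the statement is the Claim_ definition above) =====
theorem lane_match_spec : Claim_equal_lane_match := by
  intro friends bullies lane _ hpre
  unfold Spec_lane_match lane_match lane_match_alt
  rw [lmOuter_eq lane bullies friends [] [] hpre.1]
  simp
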